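-- pv_equiv track=rewrite | github.com/FlorentB974/lanmon | backend/app/scanner/avahi_scanner.py | _decode_avahi_string
-- ===== SOURCE A (Python) =====
-- def _decode_avahi_string(s: str) -> str:
--     """
--     Decode avahi escaped strings.
--
--     Avahi uses DECIMAL escapes (not octal!):
--     - \\032 = space (decimal 32)
--     - \\226\\128\\153 = UTF-8 RIGHT SINGLE QUOTATION MARK (U+2019)
--     """
--     # Collect bytes from decimal escapes and decode as UTF-8
--     byte_buffer = bytearray()
--     result_parts = []
--     i = 0
--
--     while i < len(s):
--         # Check for backslash followed by 3 digits
--         if s[i] == '\\' and i + 3 < len(s) and s[i+1:i+4].isdigit():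
--             decimal_str = s[i+1:i+4]
--             try:
--                 byte_val = int(decimal_str, 10)  # DECIMAL, not octal
--                 if byte_val < 256:
--                     byte_buffer.append(byte_val)
--                     i += 4
--                     continue
--             except ValueError:
--                 pass
--
--         # If we have buffered bytes, try to decode them as UTF-8
--         if byte_buffer:
--             try:
--                 decoded = byte_buffer.decode('utf-8', errors='replace')
--                 result_parts.append(decoded)
--             except:
--                 result_parts.append(byte_buffer.decode('latin-1', errors='replace'))
--             byte_buffer = bytearray()
--
--         result_parts.append(s[i])
--         i += 1
--
--     # Handle any remaining bytes
--     if byte_buffer: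
--         try:
--             decoded = byte_buffer.decode('utf-8', errors='replace')
--             result_parts.append(decoded)
--         except:
--             result_parts.append(byte_buffer.decode('latin-1', errors='replace'))
--
--     result = ''.join(result_parts)
--
--     # Clean up any control characters (but keep normal whitespace)
--     result = ''.join(c for c in result if ord(c) >= 32 or c in '\t\n')
--
--     return result.strip()
-- ===== SOURCE B (Python) =====
-- def _decode_avahi_string(s: str) -> str:
--     """Decode avahi decimal escapes via one split('\\\\') instead of an index loop."""
--     parts = s.split('\\')
--     byte_buffer = bytearray()
--     out = []
--
--     def flush():
--         if byte_buffer: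
--             out.append(byte_buffer.decode('utf-8', errors='replace'))
--             byte_buffer.clear()
--
--     def emit(text):
--         if text:
--             flush()
--             out.append(text)
--
--     emit(parts[0])
--     for p in parts[1:]:
--         head = p[:3]
--         if len(head) == 3 and head.isdigit() and int(head) < 256:
--             byte_buffer.append(int(head))
--             emit(p[3:])
--         else:
--             emit('\\' + p)
--     flush()
--
--     result = ''.join(c for c in ''.join(out) if ord(c) >= 32 or c in '\t\n')
--     return result.strip()
-- ===== Notes on version B (the rewrite author's own statement) =====
-- stated objective: faster
-- what changed: Replaces A's index-based while loop that probes one character and a three-character slice at every position with a single str.split on the backslash separator, treating each part's 3-digit head as an escape byte and the remainder as literal text with the same flush discipline; the Lean port also models the UTF-8 replace decode as a streaming state machine instead of A's lookahead pattern match.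
import Mathlib
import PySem

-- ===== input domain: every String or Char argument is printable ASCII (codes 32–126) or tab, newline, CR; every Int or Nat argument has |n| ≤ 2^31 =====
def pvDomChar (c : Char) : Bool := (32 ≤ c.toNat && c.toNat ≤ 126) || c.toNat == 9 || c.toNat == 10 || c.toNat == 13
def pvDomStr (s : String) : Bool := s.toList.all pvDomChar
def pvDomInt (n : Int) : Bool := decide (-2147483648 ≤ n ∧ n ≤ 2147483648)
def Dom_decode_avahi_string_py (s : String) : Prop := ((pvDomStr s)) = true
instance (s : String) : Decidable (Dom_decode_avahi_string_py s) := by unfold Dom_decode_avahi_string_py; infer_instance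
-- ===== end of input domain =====

-- B decodes the avahi string by splitting once on '\' instead of A's per-index scan (the timing
-- run measured B faster by a constant factor); return values are proved equal on the whole domain.

-- ===== PORT A =====

-- bytes 128..191 are continuation bytes
def pvCont (b : Nat) : Bool := 128 ≤ b && b ≤ 191

-- exact model of bytes.decode('utf-8', errors='replace') (CPython's maximal-subpart
-- replacement, one U+FFFD per maximal invalid prefix), by lookahead pattern matching
def pvUtf8Replace : List Nat → List Char
  | [] => []
  | b :: bs =>
    if b < 128 then Char.ofNat b :: pvUtf8Replace bs
    else if 194 ≤ b && b ≤ 223 then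
      match bs with
      | c1 :: bs2 =>
        if pvCont c1 then Char.ofNat ((b - 192) * 64 + (c1 - 128)) :: pvUtf8Replace bs2
        else '\uFFFD' :: pvUtf8Replace (c1 :: bs2)
      | [] => ['\uFFFD']
    else if 224 ≤ b && b ≤ 239 then
      match bs with
      | c1 :: bs2 =>
        if (if b = 224 then 160 else 128) ≤ c1 && c1 ≤ (if b = 237 then 159 else 191) then
          match bs2 with
          | c2 :: bs3 =>
            if pvCont c2 then
              Char.ofNat ((b - 224) * 4096 + (c1 - 128) * 64 + (c2 - 128)) :: pvUtf8Replace bs3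
            else '\uFFFD' :: pvUtf8Replace (c2 :: bs3)
          | [] => ['\uFFFD']
        else '\uFFFD' :: pvUtf8Replace (c1 :: bs2)
      | [] => ['\uFFFD']
    else if 240 ≤ b && b ≤ 244 then
      match bs with
      | c1 :: bs2 =>
        if (if b = 240 then 144 else 128) ≤ c1 && c1 ≤ (if b = 244 then 143 else 191) then
          match bs2 with
          | c2 :: bs3 =>
            if pvCont c2 then
              match bs3 with
              | c3 :: bs4 =>
                if pvCont c3 then
                  Char.ofNat ((b - 240) * 262144 + (c1 - 128) * 4096 + (c2 - 128) * 64 + (c3 - 128)) :: pvUtf8Replace bs4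
                else '\uFFFD' :: pvUtf8Replace (c3 :: bs4)
              | [] => ['\uFFFD']
            else '\uFFFD' :: pvUtf8Replace (c2 :: bs3)
          | [] => ['\uFFFD']
        else '\uFFFD' :: pvUtf8Replace (c1 :: bs2)
      | [] => ['\uFFFD']
    else '\uFFFD' :: pvUtf8Replace bs
  termination_by l => l.length
  decreasing_by all_goals (simp only [List.length_cons]; omega)

-- 'if byte_buffer: result_parts.append(byte_buffer.decode("utf-8", errors="replace"))'
-- (the latin-1 except-branch in A is dead: errors='replace' never raises)
def pvFlush (buf : List Nat) : List Char := if buf.isEmpty then [] else pvUtf8Replace buf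

-- str.isdigit on one char; exact on the printable-ASCII domain
def pvDigit (c : Char) : Bool := '0' ≤ c && c ≤ '9'

-- int(d1d2d3, 10)
def pvVal (d1 d2 d3 : Char) : Nat := (d1.toNat - 48) * 100 + (d2.toNat - 48) * 10 + (d3.toNat - 48)

-- A's escape test on the three characters after a backslash:
-- "three digits are present and their decimal value is < 256" (some value ↔ escape)
def pvEsc? : List Char → Option Nat
  | d1 :: d2 :: d3 :: _ =>
    if pvDigit d1 && pvDigit d2 && pvDigit d3 && pvVal d1 d2 d3 < 256 then some (pvVal d1 d2 d3)
    else none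
  | _ => none

-- the final filter: ord(c) >= 32 or c in '\t\n'
def pvKeep (c : Char) : Bool := 32 ≤ c.toNat || c == '\t' || c == '\n'

-- Python str.isspace (the set str.strip() removes), exact over all of Unicode
def pvIsPySpace (c : Char) : Bool :=
  let n := c.toNat
  (9 ≤ n && n ≤ 13) || (28 ≤ n && n ≤ 32) || n == 133 || n == 160 || n == 5760 ||
    (8192 ≤ n && n ≤ 8202) || n == 8232 || n == 8233 || n == 8239 || n == 8287 || n == 12288

-- str.strip()
def pvPyStrip (cs : List Char) : List Char :=
  ((cs.dropWhile pvIsPySpace).reverse.dropWhile pvIsPySpace).reverse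

-- A's while loop: index i becomes the remaining character list; 's[i]=="\\" and i+3<len(s)
-- and s[i+1:i+4].isdigit() and int(...)<256' is pvEsc? on the three chars after the backslash
def pvALoop : List Char → List Nat → List Char
  | [], buf => pvFlush buf
  | c :: rest, buf =>
    if c = '\\' then
      match pvEsc? rest with
      | some v => pvALoop (rest.drop 3) (buf ++ [v])
      | none => pvFlush buf ++ c :: pvALoop rest []
    else pvFlush buf ++ c :: pvALoop rest []
  termination_by cs _ => cs.length
  decreasing_by all_goals (simp_all; try omega)

def decode_avahi_string_py (s : String) : String :=
  String.ofList (pvPyStrip ((pvALoop s.toList []).filter pvKeep))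

-- ===== PORT B =====

-- B's model of bytes.decode('utf-8', errors='replace'): a streaming state machine.
-- State = none (no multibyte sequence pending) or some (need, acc, lo, hi):
-- 'need' continuation bytes still expected, 'acc' the accumulated code point so far,
-- [lo, hi] the admissible range for the NEXT byte (CPython narrows the first
-- continuation byte's range for E0/ED/F0/F4 leads). On a byte outside the range one
-- U+FFFD is emitted and the byte is reprocessed from the start state (maximal subpart).
def altUtf8 : Option (Nat × Nat × Nat × Nat) → List Nat → List Char
  | none, [] => []
  | some _, [] => ['\uFFFD']
  | some (need, acc, lo, hi), b :: bs =>
    if lo ≤ b ∧ b ≤ hi then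
      if need ≤ 1 then Char.ofNat (acc * 64 + (b - 128)) :: altUtf8 none bs
      else altUtf8 (some (need - 1, acc * 64 + (b - 128), 128, 191)) bs
    else '\uFFFD' :: altUtf8 none (b :: bs)
  | none, b :: bs =>
    if b ≤ 127 then Char.ofNat b :: altUtf8 none bs
    else if 194 ≤ b ∧ b ≤ 223 then altUtf8 (some (1, b - 192, 128, 191)) bs
    else if 224 ≤ b ∧ b ≤ 239 then
      altUtf8 (some (2, b - 224, if b = 224 then 160 else 128, if b = 237 then 159 else 191)) bs
    else if 240 ≤ b ∧ b ≤ 244 then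
      altUtf8 (some (3, b - 240, if b = 240 then 144 else 128, if b = 244 then 143 else 191)) bs
    else '\uFFFD' :: altUtf8 none bs
  termination_by st l => 2 * l.length + (if st.isSome then 1 else 0)
  decreasing_by all_goals (simp; try omega)

-- flush(): append the decoded pending bytes, if any
def altFlush (buf : List Nat) : List Char :=
  match buf with
  | [] => []
  | _ => altUtf8 none buf

-- 'head = p[:3]; len(head) == 3 and head.isdigit() and int(head) < 256'
def altEsc? (p : List Char) : Option Nat :=
  let h := p.take 3
  if h.length = 3 ∧ h.all Char.isDigit then
    let v := h.foldl (fun a c => a * 10 + (c.toNat - 48)) 0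
    if v < 256 then some v else none
  else none

-- s.split('\\') (hand port of split for a one-character separator; exact)
def altSplit : List Char → List (List Char)
  | [] => [[]]
  | '\\' :: rest => [] :: altSplit rest
  | c :: rest =>
    let r := altSplit rest
    (c :: r.headD []) :: r.tail

-- B's for loop over parts[1:]: each part's 3-digit head is an escape byte, the tail is
-- emitted via emit() (flush the byte buffer, then append the nonempty text)
def altLoop : List (List Char) → List Nat → List Char
  | [], buf => altFlush buf
  | p :: ps, buf =>
    match altEsc? p with
    | some v =>
      let lit := p.drop 3
      if lit = [] then altLoop ps (buf ++ [v])
      else altFlush (buf ++ [v]) ++ lit ++ altLoop ps []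
    | none => altFlush buf ++ ('\\' :: p) ++ altLoop ps []

-- ord(c) >= 32 or c in '\t\n'
def altKeep (c : Char) : Bool := c == '\t' || c == '\n' || decide (32 ≤ c.toNat)

-- Python str.isspace, written as an explicit code list plus one range
def altSpace (c : Char) : Bool :=
  let n := c.toNat
  [9, 10, 11, 12, 13, 28, 29, 30, 31, 32, 133, 160, 5760, 8232, 8233, 8239, 8287, 12288].contains n
    || (8192 ≤ n && n ≤ 8202)

-- str.strip()
def altStrip (cs : List Char) : List Char :=
  ((cs.dropWhile altSpace).reverse.dropWhile altSpace).reverse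

def decode_avahi_string_py_alt (s : String) : String :=
  match altSplit s.toList with
  | [] => ""   -- unreachable: altSplit never returns []
  | p0 :: ps =>
    -- emit(parts[0]) with an empty buffer is plain concatenation
    String.ofList (altStrip ((p0 ++ altLoop ps []).filter altKeep))

-- ===== PRECONDITION & SPEC =====
def Spec_decode_avahi_string_py (s : String) (out : String) : Prop := out = decode_avahi_string_py_alt s
instance (s : String) (out : String) : Decidable (Spec_decode_avahi_string_py s out) := by unfold Spec_decode_avahi_string_py; infer_instance

-- ===== CLAIM (what is proved, stated in full; the proofs are below) =====
def Claim_equal_decode_avahi_string_py : Prop := ∀ (s : String), Dom_decode_avahi_string_py s → Spec_decode_avahi_string_py s (decode_avahi_string_py s)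

-- ===== LEMMAS AND PROOFS =====

-- proof-only split (the simple recursion the pvMain induction is phrased over)
def pvSplitBS : List Char → List (List Char)
  | [] => [[]]
  | c :: rest =>
    if c = '\\' then [] :: pvSplitBS rest
    else
      match pvSplitBS rest with
      | p :: ps => (c :: p) :: ps
      | [] => [[c]]   -- unreachable: pvSplitBS never returns []

-- proof-only B loop phrased with A's helpers
def pvBLoop : List (List Char) → List Nat → List Char
  | [], buf => pvFlush buf
  | p :: ps, buf =>
    match pvEsc? p with
    | some v =>
      let buf' := buf ++ [v]
      let lit := p.drop 3
      if lit.isEmpty then pvBLoop ps buf'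
      else pvFlush buf' ++ lit ++ pvBLoop ps []
    | none => pvFlush buf ++ '\\' :: p ++ pvBLoop ps []

-- proof helper: B's treatment of one segment with a pending buffer
def pvEmitSeg : List (List Char) → List Nat → List Char
  | [], buf => pvFlush buf
  | p :: ps, buf => if p.isEmpty then pvBLoop ps buf else pvFlush buf ++ p ++ pvBLoop ps []

theorem pvSplitBS_ne_nil (cs : List Char) : pvSplitBS cs ≠ [] := by
  cases cs with
  | nil => simp [pvSplitBS]
  | cons c rest =>
    simp only [pvSplitBS]
    split
    · simp
    · split <;> simp

theorem pvSplitBS_no_bs : ∀ (cs p : List Char) (ps : List (List Char)), pvSplitBS cs = p :: ps →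
    '\\' ∉ p ∧ (cs = p ∧ ps = [] ∨ ∃ r, cs = p ++ '\\' :: r ∧ pvSplitBS r = ps) := by
  intro cs
  induction cs with
  | nil =>
    intro p ps h
    simp only [pvSplitBS, List.cons.injEq] at h
    obtain ⟨h1, h2⟩ := h
    subst h1; subst h2
    simp
  | cons c rest ih =>
    intro p ps h
    by_cases hc : c = '\\'
    · subst hc
      simp only [pvSplitBS, if_pos, List.cons.injEq] at h
      obtain ⟨h1, h2⟩ := h
      subst h1; subst h2
      exact ⟨by simp, Or.inr ⟨rest, rfl, rfl⟩⟩
    · cases hsp : pvSplitBS rest with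
      | nil => exact absurd hsp (pvSplitBS_ne_nil rest)
      | cons p' ps' =>
        simp [pvSplitBS, hc, hsp] at h
        obtain ⟨hnb, hcase⟩ := ih p' ps' hsp
        obtain ⟨hp, hps⟩ := h
        subst hps
        have hnp : '\\' ∉ p := by
          rw [← hp]
          simp only [List.mem_cons, not_or]
          exact ⟨fun hh => hc (Eq.symm hh), hnb⟩
        rcases hcase with ⟨h1, h2⟩ | ⟨r, h1, h2⟩
        · exact ⟨hnp, Or.inl ⟨by rw [← hp, h1], h2⟩⟩
        · exact ⟨hnp, Or.inr ⟨r, by rw [← hp, h1]; rfl, h2⟩⟩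

theorem pvDigit_bs : pvDigit '\\' = false := by decide

theorem pvEsc?_append_bs (p : List Char) (r : List Char) (h : '\\' ∉ p) :
    pvEsc? (p ++ '\\' :: r) = pvEsc? p := by
  match p with
  | [] =>
    cases r with
    | nil => rfl
    | cons a r2 =>
      cases r2 with
      | nil => rfl
      | cons b r3 => simp [pvEsc?, pvDigit_bs]
  | [d1] =>
    cases r with
    | nil => rfl
    | cons a r2 => simp [pvEsc?, pvDigit_bs]
  | [d1, d2] => simp [pvEsc?, pvDigit_bs]
  | d1 :: d2 :: d3 :: t => simp [pvEsc?]

theorem pvSplitBS_no_bs_nil (q : List Char) (h : '\\' ∉ q) : pvSplitBS q = [q] := by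
  induction q with
  | nil => rfl
  | cons c q ih =>
    simp only [List.mem_cons, not_or] at h
    have hc : ¬ c = '\\' := fun hh => h.1 (Eq.symm hh)
    simp [pvSplitBS, hc, ih h.2]

theorem pvSplitBS_no_bs_append (q r : List Char) (h : '\\' ∉ q) :
    pvSplitBS (q ++ '\\' :: r) = q :: pvSplitBS r := by
  induction q with
  | nil => simp [pvSplitBS]
  | cons c q ih =>
    simp only [List.mem_cons, not_or] at h
    have hc : ¬ c = '\\' := fun hh => h.1 (Eq.symm hh)
    simp [pvSplitBS, hc, ih h.2]

theorem pvEmitSeg_nilbuf (p : List Char) (ps : List (List Char)) :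
    pvEmitSeg (p :: ps) [] = p ++ pvBLoop ps [] := by
  cases p <;> simp [pvEmitSeg, pvFlush]

theorem pvMain (n : Nat) : ∀ (cs : List Char) (buf : List Nat), cs.length ≤ n →
    pvALoop cs buf = pvEmitSeg (pvSplitBS cs) buf := by
  induction n with
  | zero =>
    intro cs buf h
    have : cs = [] := by cases cs with | nil => rfl | cons a b => simp at h
    subst this
    simp [pvALoop, pvSplitBS, pvEmitSeg, pvBLoop]
  | succ n ih =>
    intro cs buf h
    cases cs with
    | nil => simp [pvALoop, pvSplitBS, pvEmitSeg, pvBLoop]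
    | cons c rest =>
      have hrest : rest.length ≤ n := by simp at h; omega
      by_cases hc : c = '\\'
      · subst hc
        cases hsp : pvSplitBS rest with
        | nil => exact absurd hsp (pvSplitBS_ne_nil rest)
        | cons p ps =>
          obtain ⟨hnb, hdec⟩ := pvSplitBS_no_bs rest p ps hsp
          have hesc : pvEsc? rest = pvEsc? p := by
            rcases hdec with ⟨h1, _⟩ | ⟨r, h1, _⟩
            · rw [h1]
            · rw [h1, pvEsc?_append_bs p r hnb]
          have hsplit : pvSplitBS ('\\' :: rest) = [] :: p :: ps := by
            simp [pvSplitBS, hsp]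
          rw [hsplit]
          have hrhs : pvEmitSeg ([] :: p :: ps) buf = pvBLoop (p :: ps) buf := by
            simp [pvEmitSeg]
          rw [hrhs]
          cases he : pvEsc? p with
          | none =>
            have hA : pvALoop ('\\' :: rest) buf = pvFlush buf ++ '\\' :: pvALoop rest [] := by
              rw [pvALoop]
              simp [hesc, he]
            rw [hA, ih rest [] hrest, hsp, pvEmitSeg_nilbuf]
            simp [pvBLoop, he]
          | some v =>
            match p, he with
            | d1 :: d2 :: d3 :: lit, he =>
              have hnblit : '\\' ∉ lit := by simp at hnb; exact hnb.2.2.2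
              have hA : pvALoop ('\\' :: rest) buf = pvALoop (rest.drop 3) (buf ++ [v]) := by
                rw [pvALoop]
                simp [hesc, he]
              have hmid : pvALoop (rest.drop 3) (buf ++ [v]) = pvEmitSeg (lit :: ps) (buf ++ [v]) := by
                rcases hdec with ⟨h1, h2⟩ | ⟨r, h1, h2⟩
                · subst h1
                  rw [show List.drop 3 (d1 :: d2 :: d3 :: lit) = lit from rfl]
                  rw [ih (lit) (buf ++ [v]) (by simp at hrest ⊢; omega)]
                  rw [pvSplitBS_no_bs_nil lit hnblit, h2]
                · subst h1
                  have hdrop : ((d1 :: d2 :: d3 :: lit) ++ '\\' :: r).drop 3 = lit ++ '\\' :: r := by rfl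
                  rw [hdrop, ih (lit ++ '\\' :: r) (buf ++ [v]) (by simp at hrest ⊢; omega)]
                  rw [pvSplitBS_no_bs_append lit r hnblit, h2]
              rw [hA, hmid]
              have : pvBLoop ((d1 :: d2 :: d3 :: lit) :: ps) buf = pvEmitSeg (lit :: ps) (buf ++ [v]) := by
                rw [pvBLoop]
                simp only [he, pvEmitSeg]
                cases lit <;> simp [pvFlush]
              rw [this]
      · cases hsp : pvSplitBS rest with
        | nil => exact absurd hsp (pvSplitBS_ne_nil rest)
        | cons p ps =>
          have hsplit : pvSplitBS (c :: rest) = (c :: p) :: ps := by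
            simp [pvSplitBS, hc, hsp]
          have hA : pvALoop (c :: rest) buf = pvFlush buf ++ c :: pvALoop rest [] := by
            rw [pvALoop]
            simp [hc]
          rw [hsplit, hA, ih rest [] hrest, hsp, pvEmitSeg_nilbuf]
          simp [pvEmitSeg]

-- ===== bridge lemmas: B's own helpers equal the proof-side models =====

theorem altSplit_cons (c : Char) (rest : List Char) :
    altSplit (c :: rest) = if c = '\\' then [] :: altSplit rest
      else (c :: (altSplit rest).headD []) :: (altSplit rest).tail := by
  by_cases hc : c = '\\'
  · subst hc; simp [altSplit]
  · rw [if_neg hc, altSplit.eq_def]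
    split <;> simp_all

theorem altSplit_eq (cs : List Char) : altSplit cs = pvSplitBS cs := by
  induction cs with
  | nil => rfl
  | cons c rest ih =>
    rw [altSplit_cons, ih]
    by_cases hc : c = '\\'
    · simp [hc, pvSplitBS]
    · cases hsp : pvSplitBS rest with
      | nil => exact absurd hsp (pvSplitBS_ne_nil rest)
      | cons p ps => simp [hsp, pvSplitBS, hc]

theorem altU_none_nil : altUtf8 none [] = [] := by
  rw [altUtf8.eq_def]

theorem altU_some_nil (st : Nat × Nat × Nat × Nat) : altUtf8 (some st) [] = ['\uFFFD'] := by
  rw [altUtf8.eq_def]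

theorem altU_some_cons (need acc lo hi b : Nat) (bs : List Nat) :
    altUtf8 (some (need, acc, lo, hi)) (b :: bs) =
      if lo ≤ b ∧ b ≤ hi then
        if need ≤ 1 then Char.ofNat (acc * 64 + (b - 128)) :: altUtf8 none bs
        else altUtf8 (some (need - 1, acc * 64 + (b - 128), 128, 191)) bs
      else '\uFFFD' :: altUtf8 none (b :: bs) := by
  conv_lhs => rw [altUtf8.eq_def]

theorem altU_none_cons (b : Nat) (bs : List Nat) :
    altUtf8 none (b :: bs) =
      if b ≤ 127 then Char.ofNat b :: altUtf8 none bs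
      else if 194 ≤ b ∧ b ≤ 223 then altUtf8 (some (1, b - 192, 128, 191)) bs
      else if 224 ≤ b ∧ b ≤ 239 then
        altUtf8 (some (2, b - 224, if b = 224 then 160 else 128, if b = 237 then 159 else 191)) bs
      else if 240 ≤ b ∧ b ≤ 244 then
        altUtf8 (some (3, b - 240, if b = 240 then 144 else 128, if b = 244 then 143 else 191)) bs
      else '\uFFFD' :: altUtf8 none bs := by
  conv_lhs => rw [altUtf8.eq_def]

theorem pvU_cons (b : Nat) (bs : List Nat) :
    pvUtf8Replace (b :: bs) =
      (if b < 128 then Char.ofNat b :: pvUtf8Replace bs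
      else if 194 ≤ b && b ≤ 223 then
        match bs with
        | c1 :: bs2 =>
          if pvCont c1 then Char.ofNat ((b - 192) * 64 + (c1 - 128)) :: pvUtf8Replace bs2
          else '\uFFFD' :: pvUtf8Replace (c1 :: bs2)
        | [] => ['\uFFFD']
      else if 224 ≤ b && b ≤ 239 then
        match bs with
        | c1 :: bs2 =>
          if (if b = 224 then 160 else 128) ≤ c1 && c1 ≤ (if b = 237 then 159 else 191) then
            match bs2 with
            | c2 :: bs3 =>
              if pvCont c2 then
                Char.ofNat ((b - 224) * 4096 + (c1 - 128) * 64 + (c2 - 128)) :: pvUtf8Replace bs3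
              else '\uFFFD' :: pvUtf8Replace (c2 :: bs3)
            | [] => ['\uFFFD']
          else '\uFFFD' :: pvUtf8Replace (c1 :: bs2)
        | [] => ['\uFFFD']
      else if 240 ≤ b && b ≤ 244 then
        match bs with
        | c1 :: bs2 =>
          if (if b = 240 then 144 else 128) ≤ c1 && c1 ≤ (if b = 244 then 143 else 191) then
            match bs2 with
            | c2 :: bs3 =>
              if pvCont c2 then
                match bs3 with
                | c3 :: bs4 =>
                  if pvCont c3 then
                    Char.ofNat ((b - 240) * 262144 + (c1 - 128) * 4096 + (c2 - 128) * 64 + (c3 - 128)) :: pvUtf8Replace bs4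
                  else '\uFFFD' :: pvUtf8Replace (c3 :: bs4)
                | [] => ['\uFFFD']
              else '\uFFFD' :: pvUtf8Replace (c2 :: bs3)
            | [] => ['\uFFFD']
          else '\uFFFD' :: pvUtf8Replace (c1 :: bs2)
        | [] => ['\uFFFD']
      else '\uFFFD' :: pvUtf8Replace bs) := by
  conv_lhs => rw [pvUtf8Replace.eq_def]

theorem pvU_nil : pvUtf8Replace [] = [] := by rw [pvUtf8Replace.eq_def]

set_option maxRecDepth 8000 in
theorem altUtf8_eq (n : Nat) : ∀ (bs : List Nat), bs.length ≤ n → altUtf8 none bs = pvUtf8Replace bs := by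
  induction n with
  | zero =>
    intro bs h
    have : bs = [] := by cases bs with | nil => rfl | cons a b => simp at h
    subst this; rw [altU_none_nil, pvU_nil]
  | succ n ih =>
    intro bs h
    cases bs with
    | nil => rw [altU_none_nil, pvU_nil]
    | cons b bs =>
      have hbs : bs.length ≤ n := by simp at h; omega
      rw [pvU_cons, altU_none_cons]
      by_cases h1 : b < 128
      · simp only [if_pos h1, if_pos (by omega : b ≤ 127), ih bs hbs]
      · simp only [if_neg h1, if_neg (by omega : ¬ b ≤ 127)]
        by_cases h2 : 194 ≤ b ∧ b ≤ 223
        · simp only [if_pos h2, if_pos (by simp [h2.1, h2.2] : (194 ≤ b && b ≤ 223) = true)]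
          cases bs with
          | nil => rw [altU_some_nil]
          | cons c1 bs2 =>
            have hbs2 : bs2.length ≤ n := by simp at hbs; omega
            rw [altU_some_cons]
            by_cases hcont : 128 ≤ c1 ∧ c1 ≤ 191
            · simp only [if_pos hcont, if_pos (le_refl 1),
                if_pos (by simp [pvCont, hcont.1, hcont.2] : pvCont c1 = true), ih bs2 hbs2]
            · have hcf : pvCont c1 = false := by simp [pvCont]; omega
              simp only [if_neg hcont, hcf, Bool.false_eq_true, if_false, ih (c1 :: bs2) hbs]
        · simp only [if_neg h2, if_neg (by simp; omega : ¬ (194 ≤ b && b ≤ 223) = true)]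
          by_cases h3 : 224 ≤ b ∧ b ≤ 239
          · simp only [if_pos h3, if_pos (by simp [h3.1, h3.2] : (224 ≤ b && b ≤ 239) = true)]
            cases bs with
            | nil => rw [altU_some_nil]
            | cons c1 bs2 =>
              have hbs2 : bs2.length ≤ n := by simp at hbs; omega
              rw [altU_some_cons]
              by_cases hr1 : (if b = 224 then 160 else 128) ≤ c1 ∧ c1 ≤ (if b = 237 then 159 else 191)
              · simp only [if_pos hr1, if_pos (by simp [hr1.1, hr1.2] :
                  ((if b = 224 then 160 else 128) ≤ c1 && c1 ≤ (if b = 237 then 159 else 191)) = true),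
                  if_neg (by omega : ¬ (2 : Nat) ≤ 1)]
                cases bs2 with
                | nil => rw [altU_some_nil]
                | cons c2 bs3 =>
                  have hbs3 : bs3.length ≤ n := by simp at hbs2; omega
                  rw [altU_some_cons]
                  by_cases hcont : 128 ≤ c2 ∧ c2 ≤ 191
                  · simp only [if_pos hcont, if_pos (by omega : (2 : Nat) - 1 ≤ 1),
                      if_pos (by simp [pvCont, hcont.1, hcont.2] : pvCont c2 = true), ih bs3 hbs3]
                    congr 2
                    omega
                  · have hcf : pvCont c2 = false := by simp [pvCont]; omega
                    simp only [if_neg hcont, hcf, Bool.false_eq_true, if_false, ih (c2 :: bs3) hbs2]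
              · have hf : ((if b = 224 then 160 else 128) ≤ c1 && c1 ≤ (if b = 237 then 159 else 191)) = false := by
                  rcases not_and_or.mp hr1 with hh | hh <;> simp [hh]
                simp only [if_neg hr1, hf, Bool.false_eq_true, if_false, ih (c1 :: bs2) hbs]
          · simp only [if_neg h3, if_neg (by simp; omega : ¬ (224 ≤ b && b ≤ 239) = true)]
            by_cases h4 : 240 ≤ b ∧ b ≤ 244
            · simp only [if_pos h4, if_pos (by simp [h4.1, h4.2] : (240 ≤ b && b ≤ 244) = true)]
              cases bs with
              | nil => rw [altU_some_nil]
              | cons c1 bs2 =>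
                have hbs2 : bs2.length ≤ n := by simp at hbs; omega
                rw [altU_some_cons]
                by_cases hr1 : (if b = 240 then 144 else 128) ≤ c1 ∧ c1 ≤ (if b = 244 then 143 else 191)
                · simp only [if_pos hr1, if_pos (by simp [hr1.1, hr1.2] :
                    ((if b = 240 then 144 else 128) ≤ c1 && c1 ≤ (if b = 244 then 143 else 191)) = true),
                    if_neg (by omega : ¬ (3 : Nat) ≤ 1)]
                  cases bs2 with
                  | nil => rw [altU_some_nil]
                  | cons c2 bs3 =>
                    have hbs3 : bs3.length ≤ n := by simp at hbs2; omega
                    rw [altU_some_cons]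
                    by_cases hcont : 128 ≤ c2 ∧ c2 ≤ 191
                    · simp only [if_pos hcont, if_pos (by simp [pvCont, hcont.1, hcont.2] : pvCont c2 = true),
                        if_neg (by omega : ¬ (3 : Nat) - 1 ≤ 1)]
                      cases bs3 with
                      | nil => rw [altU_some_nil]
                      | cons c3 bs4 =>
                        have hbs4 : bs4.length ≤ n := by simp at hbs3; omega
                        rw [altU_some_cons]
                        by_cases hcont3 : 128 ≤ c3 ∧ c3 ≤ 191
                        · simp only [if_pos hcont3, if_pos (by omega : (3 : Nat) - 1 - 1 ≤ 1),
                            if_pos (by simp [pvCont, hcont3.1, hcont3.2] : pvCont c3 = true), ih bs4 hbs4]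
                          congr 2
                          omega
                        · have hcf : pvCont c3 = false := by simp [pvCont]; omega
                          simp only [if_neg hcont3, hcf, Bool.false_eq_true, if_false, ih (c3 :: bs4) hbs3]
                    · have hcf : pvCont c2 = false := by simp [pvCont]; omega
                      simp only [if_neg hcont, hcf, Bool.false_eq_true, if_false, ih (c2 :: bs3) hbs2]
                · have hf : ((if b = 240 then 144 else 128) ≤ c1 && c1 ≤ (if b = 244 then 143 else 191)) = false := by
                    rcases not_and_or.mp hr1 with hh | hh <;> simp [hh]
                  simp only [if_neg hr1, hf, Bool.false_eq_true, if_false, ih (c1 :: bs2) hbs]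
            · simp only [if_neg h4, if_neg (by simp; omega : ¬ (240 ≤ b && b ≤ 244) = true), ih bs hbs]

theorem altFlush_eq (buf : List Nat) : altFlush buf = pvFlush buf := by
  cases buf with
  | nil => rfl
  | cons b bs =>
    simp only [altFlush, pvFlush, List.isEmpty_cons, Bool.false_eq_true, if_false]
    exact altUtf8_eq (b :: bs).length (b :: bs) le_rfl

theorem altEsc?_eq (p : List Char) : altEsc? p = pvEsc? p := by
  match p with
  | [] => rfl
  | [d1] => rfl
  | [d1, d2] => rfl
  | d1 :: d2 :: d3 :: t =>
    have ht : (d1 :: d2 :: d3 :: t).take 3 = [d1, d2, d3] := rfl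
    have hfold : ((0 * 10 + (d1.toNat - 48)) * 10 + (d2.toNat - 48)) * 10 + (d3.toNat - 48)
        = pvVal d1 d2 d3 := by unfold pvVal; omega
    have hd : ∀ c : Char, Char.isDigit c = pvDigit c := fun c => rfl
    by_cases h1 : pvDigit d1 = true <;> by_cases h2 : pvDigit d2 = true <;>
      by_cases h3 : pvDigit d3 = true <;> by_cases h4 : pvVal d1 d2 d3 < 256 <;>
      simp [altEsc?, pvEsc?, ht, List.foldl, hd, h1, h2, h3, h4] <;> unfold pvVal at * <;> omega

theorem altLoop_eq (ps : List (List Char)) : ∀ buf, altLoop ps buf = pvBLoop ps buf := by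
  induction ps with
  | nil => intro buf; simp [altLoop, pvBLoop, altFlush_eq]
  | cons p ps ih =>
    intro buf
    rw [altLoop, pvBLoop, altEsc?_eq]
    cases pvEsc? p with
    | none => simp [altFlush_eq, ih]
    | some v =>
      simp only
      by_cases hl : p.drop 3 = []
      · simp [hl, ih]
      · simp [hl, altFlush_eq, ih]

theorem altKeep_eq (c : Char) : altKeep c = pvKeep c := by
  simp only [altKeep, pvKeep]
  by_cases h : 32 ≤ c.toNat <;> simp [h]

theorem altSpace_eq (c : Char) : altSpace c = pvIsPySpace c := by
  rw [Bool.eq_iff_iff]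
  simp only [altSpace, pvIsPySpace, List.contains_eq_mem, List.mem_cons, List.not_mem_nil,
    or_false, Bool.or_eq_true, Bool.and_eq_true, decide_eq_true_eq, beq_iff_eq]
  omega

theorem altStrip_eq (cs : List Char) : altStrip cs = pvPyStrip cs := by
  have h : ∀ l : List Char, l.dropWhile altSpace = l.dropWhile pvIsPySpace := by
    intro l
    induction l with
    | nil => rfl
    | cons a t ih => simp [List.dropWhile, altSpace_eq, ih]
  simp [altStrip, pvPyStrip, h]

-- ===== VERDICT (by name: the statement is the Claim_ definition above) =====
theorem decode_avahi_string_py_spec : Claim_equal_decode_avahi_string_py := by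
  intro s _
  unfold Spec_decode_avahi_string_py decode_avahi_string_py decode_avahi_string_py_alt
  obtain ⟨p0, ps, h⟩ : ∃ p0 ps, pvSplitBS s.toList = p0 :: ps := by
    cases hh : pvSplitBS s.toList with
    | nil => exact absurd hh (pvSplitBS_ne_nil _)
    | cons a b => exact ⟨a, b, rfl⟩
  rw [altSplit_eq, h]
  change _ = String.ofList (altStrip (List.filter altKeep (p0 ++ altLoop ps [])))
  rw [pvMain s.toList.length s.toList [] le_rfl, h, pvEmitSeg_nilbuf]
  rw [altLoop_eq, altStrip_eq]
  rw [List.filter_congr (fun x _ => altKeep_eq x)]
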